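-- pv_equiv track=rewrite | github.com/eliottcassidy2000/math | 04-computation/counterexample_anatomy.py | build_omega_graph
-- ===== SOURCE A (Python) =====
-- def build_omega_graph(cycles):
--     """Build the conflict graph Omega: vertices=odd directed cycles, edges=shared vertices."""
--     cycle_list = list(cycles)
--     vertex_sets = [set(c) for c in cycle_list]
--     m = len(cycle_list)
--     adj = [[False]*m for _ in range(m)]
--     for i in range(m):
--         for j in range(i+1, m):
--             if vertex_sets[i] & vertex_sets[j]:
--                 adj[i][j] = True
--                 adj[j][i] = True
--     return cycle_list, adj
-- ===== SOURCE B (Python) =====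
-- def build_omega_graph(cycles):
--     """Build the conflict graph Omega via an inverted index vertex -> cycles.
--
--     Instead of intersecting every pair of vertex sets, index which cycles
--     contain each vertex and mark adjacency only among co-located cycles.
--     """
--     cycle_list = list(cycles)
--     m = len(cycle_list)
--     occ = {}
--     for i, c in enumerate(cycle_list):
--         for v in set(c):
--             occ.setdefault(v, []).append(i)
--     adj = [[False] * m for _ in range(m)]
--     for idxs in occ.values():
--         k = len(idxs)
--         for a in range(k):
--             i = idxs[a]
--             for b in range(a + 1, k):
--                 j = idxs[b]
--                 adj[i][j] = True
--                 adj[j][i] = True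
--     return cycle_list, adj
-- ===== Notes on version B (the rewrite author's own statement) =====
-- stated objective: faster
-- what changed: Replaces the all-pairs set-intersection test with an inverted index vertex->cycle indices, marking adjacency only among cycles that actually share a vertex.
import Mathlib
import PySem

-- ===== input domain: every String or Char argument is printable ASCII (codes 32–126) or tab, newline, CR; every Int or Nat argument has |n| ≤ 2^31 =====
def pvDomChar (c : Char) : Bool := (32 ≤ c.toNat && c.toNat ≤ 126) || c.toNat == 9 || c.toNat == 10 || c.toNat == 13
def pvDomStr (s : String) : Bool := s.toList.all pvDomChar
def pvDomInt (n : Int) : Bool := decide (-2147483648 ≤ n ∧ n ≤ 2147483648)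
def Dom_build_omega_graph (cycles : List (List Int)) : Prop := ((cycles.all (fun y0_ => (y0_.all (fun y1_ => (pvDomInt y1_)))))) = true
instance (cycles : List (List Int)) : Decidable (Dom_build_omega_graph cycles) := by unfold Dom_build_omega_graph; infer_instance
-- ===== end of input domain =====

-- B replaces the all-pairs set-intersection scan with an inverted index vertex -> cycle indices,
-- marking adjacency only among co-located cycles (objective: faster).

-- ===== PORT A =====

-- 'adj[i][j] = True' on the nested boolean matrix (out-of-range writes cannot occur on A's indices)
def pvSet2 (M : List (List Bool)) (i j : Nat) : List (List Bool) :=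
  M.modify i (fun row => row.set j true)

-- Port of A. 'range(i+1, m)' is List.range' (i+1) (m - (i+1)); 'vertex_sets[i]' is a safe index
-- (i < m always), ported as getD; 'if s & t:' is truthiness of the set intersection, i.e. ≠ [].
def build_omega_graph (cycles : List (List Int)) : List (List Int) × List (List Bool) :=
  let cycle_list := cycles
  let vertex_sets := cycle_list.map (fun c => PySem.Set.ofList c)
  let m := cycle_list.length
  let adj0 := List.replicate m (List.replicate m false)
  let adj := (List.range m).foldl (fun adj i =>
    (List.range' (i+1) (m - (i+1))).foldl (fun adj j =>
      if PySem.Set.inter (vertex_sets.getD i []) (vertex_sets.getD j []) ≠ [] then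
        pvSet2 (pvSet2 adj i j) j i
      else adj) adj) adj0
  (cycle_list, adj)

-- ===== PORT B =====

-- the 'for i, c in enumerate(cycle_list): for v in set(c): occ.setdefault(v, []).append(i)' loop
-- (indices are the nonnegative enumerate counters, kept as Nat)
def pvOccStep (i : Nat) (occ : PySem.Dict Int (List Nat)) (c : List Int) : PySem.Dict Int (List Nat) :=
  (PySem.Set.ofList c).foldl (fun occ v => occ.insert v (occ.getD v [] ++ [i])) occ

def pvBuildOcc : List (List Int) → Nat → PySem.Dict Int (List Nat) → PySem.Dict Int (List Nat)
  | [], _, occ => occ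
  | c :: rest, i, occ => pvBuildOcc rest (i + 1) (pvOccStep i occ c)

-- Port of B (Source B). 'idxs[a]'/'idxs[b]' are safe indices (a, b < len(idxs)), ported as getD.
def build_omega_graph_alt (cycles : List (List Int)) : List (List Int) × List (List Bool) :=
  let cycle_list := cycles
  let m := cycle_list.length
  let occ := pvBuildOcc cycle_list 0 PySem.Dict.empty
  let adj0 := List.replicate m (List.replicate m false)
  let adj := occ.values.foldl (fun adj idxs =>
    let k := idxs.length
    (List.range k).foldl (fun adj a =>
      (List.range' (a+1) (k - (a+1))).foldl (fun adj b =>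
        pvSet2 (pvSet2 adj (idxs.getD a 0) (idxs.getD b 0)) (idxs.getD b 0) (idxs.getD a 0)) adj) adj) adj0
  (cycle_list, adj)

-- ===== PRECONDITION & SPEC =====
def Spec_build_omega_graph (cycles : List (List Int)) (out : List (List Int) × List (List Bool)) : Prop := out = build_omega_graph_alt cycles
instance (cycles : List (List Int)) (out : List (List Int) × List (List Bool)) : Decidable (Spec_build_omega_graph cycles out) := by unfold Spec_build_omega_graph; infer_instance

-- ===== CLAIM (what is proved, stated in full; the proofs are below) =====
def Claim_equal_build_omega_graph : Prop := ∀ (cycles : List (List Int)), Dom_build_omega_graph cycles → Spec_build_omega_graph cycles (build_omega_graph cycles)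

-- ===== LEMMAS AND PROOFS =====

def pvGet2 (M : List (List Bool)) (i j : Nat) : Bool :=
  ((M[i]?.bind (fun r => r[j]?)).getD false)

def pvInB (M : List (List Bool)) (i j : Nat) : Bool :=
  decide (i < M.length) && decide (j < (M[i]?.getD []).length)

def pvApply (ps : List (Nat × Nat)) (M : List (List Bool)) : List (List Bool) :=
  ps.foldl (fun M p => pvSet2 M p.1 p.2) M

lemma pvSet2_length (M : List (List Bool)) (a b : Nat) : (pvSet2 M a b).length = M.length := by
  simp [pvSet2]

lemma pvOptLen_eq {o o' : Option (List Bool)} (h : o.map List.length = o'.map List.length) :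
    (o.getD []).length = (o'.getD []).length := by
  cases o <;> cases o' <;> simp_all

lemma pvSet2_shape (M : List (List Bool)) (a b i : Nat) :
    ((pvSet2 M a b)[i]?).map List.length = (M[i]?).map List.length := by
  simp only [pvSet2, List.getElem?_modify]
  cases h : M[i]? with
  | none => rfl
  | some r => by_cases hai : a = i <;> simp [hai]

lemma pvInB_set2 (M : List (List Bool)) (a b p q : Nat) :
    pvInB (pvSet2 M a b) p q = pvInB M p q := by
  unfold pvInB
  rw [pvSet2_length, pvOptLen_eq (pvSet2_shape M a b p)]

lemma pvGet2_set2 (M : List (List Bool)) (a b p q : Nat) :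
    pvGet2 (pvSet2 M a b) p q =
      (pvGet2 M p q || (decide (p = a) && decide (q = b) && pvInB M p q)) := by
  unfold pvGet2 pvInB pvSet2
  rw [List.getElem?_modify]
  cases hM : M[p]? with
  | none =>
    have hlen : ¬ p < M.length := by
      intro hp; exact absurd hM (by simp [List.getElem?_eq_getElem hp])
    simp [hlen]
  | some r =>
    have hlen : p < M.length := by
      by_contra hp
      rw [List.getElem?_eq_none_iff.mpr (by omega)] at hM; simp at hM
    by_cases hap : a = p
    · subst hap
      simp only [hM, Option.map_some, Option.bind_some]
      by_cases hqb : q = b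
      · subst hqb
        by_cases hq : q < r.length
        · simp [List.getElem?_set, hq, hlen, hM]
        · have h1 : r[q]? = none := List.getElem?_eq_none_iff.mpr (by omega)
          simp [List.getElem?_set, hq, hlen, hM, h1]
      · simp [List.getElem?_set, Ne.symm hqb, hqb, hM]
    · have hpa : ¬ p = a := fun h => hap h.symm
      simp [hM, hap, hpa]

lemma pvApply_shape (ps : List (Nat × Nat)) (M : List (List Bool)) (i : Nat) :
    ((pvApply ps M)[i]?).map List.length = (M[i]?).map List.length := by
  induction ps generalizing M with
  | nil => rfl
  | cons x t ih => simp [pvApply] at ih ⊢; rw [ih, pvSet2_shape]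

lemma pvApply_length (ps : List (Nat × Nat)) (M : List (List Bool)) :
    (pvApply ps M).length = M.length := by
  induction ps generalizing M with
  | nil => rfl
  | cons x t ih => simp [pvApply] at ih ⊢; rw [ih, pvSet2_length]

lemma pvGet2_apply (ps : List (Nat × Nat)) (M : List (List Bool)) (p q : Nat) :
    pvGet2 (pvApply ps M) p q = (pvGet2 M p q || (decide ((p, q) ∈ ps) && pvInB M p q)) := by
  induction ps generalizing M with
  | nil => simp [pvApply]
  | cons x t ih =>
    obtain ⟨x1, x2⟩ := x
    have h1 : pvApply ((x1, x2) :: t) M = pvApply t (pvSet2 M x1 x2) := rfl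
    rw [h1, ih, pvGet2_set2, pvInB_set2]
    by_cases e1 : p = x1 <;> by_cases e2 : q = x2 <;>
      by_cases e3 : (p, q) ∈ t <;>
      simp [e1, e2, e3, List.mem_cons, Prod.ext_iff] <;>
      cases pvGet2 M p q <;> cases pvInB M p q <;> simp_all

lemma pvApply_append (ps qs : List (Nat × Nat)) (M : List (List Bool)) :
    pvApply (ps ++ qs) M = pvApply qs (pvApply ps M) := by
  simp [pvApply, List.foldl_append]

lemma pvApply_foldl {α : Type} (l : List α) (g : α → List (Nat × Nat)) (M : List (List Bool)) :
    l.foldl (fun M x => pvApply (g x) M) M = pvApply (l.flatMap g) M := by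
  induction l generalizing M with
  | nil => rfl
  | cons x t ih => simp [List.flatMap_cons, pvApply_append, ih]

lemma pvApply_eq_of_mem_iff (ps qs : List (Nat × Nat)) (M : List (List Bool))
    (h : ∀ p q, pvInB M p q = true → ((p, q) ∈ ps ↔ (p, q) ∈ qs)) :
    pvApply ps M = pvApply qs M := by
  apply List.ext_getElem
  · rw [pvApply_length, pvApply_length]
  · intro p h1 h2
    have hp : p < M.length := by rwa [pvApply_length] at h1
    have hshape1 := pvApply_shape ps M p
    have hshape2 := pvApply_shape qs M p
    apply List.ext_getElem
    · have e1 := pvOptLen_eq hshape1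
      have e2 := pvOptLen_eq hshape2
      simp only [List.getElem?_eq_getElem h1, List.getElem?_eq_getElem h2,
        List.getElem?_eq_getElem hp, Option.getD_some] at e1 e2
      omega
    · intro q hq1 hq2
      have hrowM : ((pvApply ps M)[p]).length = (M[p]).length := by
        have := pvOptLen_eq hshape1
        simpa [List.getElem?_eq_getElem h1, List.getElem?_eq_getElem hp] using this
      have hqM : q < (M[p]).length := by omega
      have hInB : pvInB M p q = true := by
        simp [pvInB, hp, List.getElem?_eq_getElem hp, hqM]
      have g1 : (pvApply ps M)[p][q] = pvGet2 (pvApply ps M) p q := by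
        simp [pvGet2, List.getElem?_eq_getElem h1, List.getElem?_eq_getElem hq1]
      have g2 : (pvApply qs M)[p][q] = pvGet2 (pvApply qs M) p q := by
        simp [pvGet2, List.getElem?_eq_getElem h2, List.getElem?_eq_getElem hq2]
      rw [g1, g2, pvGet2_apply, pvGet2_apply]
      simp only [decide_eq_decide.mpr (h p q hInB)]

-- ---- characterisation of the shared-vertex relation ----

def pvShared (cycles : List (List Int)) (p q : Nat) : Prop :=
  ∃ v, v ∈ cycles.getD p [] ∧ v ∈ cycles.getD q []

def pairsA (cycles : List (List Int)) : List (Nat × Nat) :=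
  let vertex_sets := cycles.map (fun c => PySem.Set.ofList c)
  let m := cycles.length
  (List.range m).flatMap (fun i =>
    (List.range' (i+1) (m - (i+1))).flatMap (fun j =>
      if PySem.Set.inter (vertex_sets.getD i []) (vertex_sets.getD j []) ≠ [] then
        [(i, j), (j, i)]
      else []))

def pvPairsOf (idxs : List Nat) : List (Nat × Nat) :=
  (List.range idxs.length).flatMap (fun a =>
    (List.range' (a+1) (idxs.length - (a+1))).flatMap (fun b =>
      [(idxs.getD a 0, idxs.getD b 0), (idxs.getD b 0, idxs.getD a 0)]))

def pairsB (cycles : List (List Int)) : List (Nat × Nat) :=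
  (pvBuildOcc cycles 0 PySem.Dict.empty).values.flatMap pvPairsOf

lemma build_A_eq_apply (cycles : List (List Int)) :
    build_omega_graph cycles =
      (cycles, pvApply (pairsA cycles)
        (List.replicate cycles.length (List.replicate cycles.length false))) := by
  unfold build_omega_graph pairsA
  refine congrArg _ ?_
  rw [← pvApply_foldl]
  apply PySem.List.foldl_congr_mem
  intro adj i _
  rw [← pvApply_foldl]
  apply PySem.List.foldl_congr_mem
  intro adj' j _
  split <;> rfl

lemma build_B_eq_apply (cycles : List (List Int)) :
    build_omega_graph_alt cycles =
      (cycles, pvApply (pairsB cycles)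
        (List.replicate cycles.length (List.replicate cycles.length false))) := by
  unfold build_omega_graph_alt pairsB
  refine congrArg _ ?_
  rw [← pvApply_foldl]
  apply PySem.List.foldl_congr_mem
  intro adj idxs _
  unfold pvPairsOf
  rw [← pvApply_foldl]
  apply PySem.List.foldl_congr_mem
  intro adj' a _
  rw [← pvApply_foldl]
  apply PySem.List.foldl_congr_mem
  intro adj'' b _
  rfl

lemma pvShared_symm {cycles : List (List Int)} {p q : Nat}
    (h : pvShared cycles p q) : pvShared cycles q p := by
  obtain ⟨v, h1, h2⟩ := h; exact ⟨v, h2, h1⟩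

lemma pvMapSet_getD (cycles : List (List Int)) (i : Nat) (h : i < cycles.length) :
    (cycles.map (fun c => PySem.Set.ofList c)).getD i [] = PySem.Set.ofList (cycles.getD i []) := by
  simp [List.getD_eq_getElem?_getD, List.getElem?_map, List.getElem?_eq_getElem h]

lemma pvCondA_iff (cycles : List (List Int)) (i j : Nat) (hi : i < cycles.length) (hj : j < cycles.length) :
    (PySem.Set.inter ((cycles.map (fun c => PySem.Set.ofList c)).getD i [])
      ((cycles.map (fun c => PySem.Set.ofList c)).getD j []) ≠ []) ↔ pvShared cycles i j := by
  rw [pvMapSet_getD cycles i hi, pvMapSet_getD cycles j hj]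
  constructor
  · intro h
    obtain ⟨v, hv⟩ := List.exists_mem_of_ne_nil _ h
    rw [PySem.Set.mem_inter] at hv
    exact ⟨v, (PySem.Set.mem_ofList _ _).mp hv.1, (PySem.Set.mem_ofList _ _).mp hv.2⟩
  · rintro ⟨v, h1, h2⟩ hnil
    have : v ∈ PySem.Set.inter (PySem.Set.ofList (cycles.getD i [])) (PySem.Set.ofList (cycles.getD j [])) := by
      rw [PySem.Set.mem_inter]
      exact ⟨(PySem.Set.mem_ofList _ _).mpr h1, (PySem.Set.mem_ofList _ _).mpr h2⟩
    rw [hnil] at this; exact absurd this (List.not_mem_nil)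

lemma mem_pairsA (cycles : List (List Int)) (p q : Nat) :
    (p, q) ∈ pairsA cycles ↔
      p < cycles.length ∧ q < cycles.length ∧ p ≠ q ∧ pvShared cycles p q := by
  simp only [pairsA, List.mem_flatMap, List.mem_range, List.mem_range'_1]
  constructor
  · rintro ⟨i, hi, j, ⟨hj1, hj2⟩, hmem⟩
    have hjm : j < cycles.length := by omega
    split at hmem
    case isTrue hcond =>
      have hsh : pvShared cycles i j := (pvCondA_iff cycles i j hi hjm).mp hcond
      simp only [List.mem_cons, List.not_mem_nil, or_false] at hmem
      rcases hmem with h | h <;> rw [Prod.ext_iff] at h <;> obtain ⟨rfl, rfl⟩ := h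
      · exact ⟨hi, hjm, by omega, hsh⟩
      · exact ⟨hjm, hi, by omega, pvShared_symm hsh⟩
    case isFalse => exact absurd hmem (List.not_mem_nil)
  · rintro ⟨hp, hq, hne, hsh⟩
    rcases Nat.lt_or_gt_of_ne hne with hlt | hgt
    · refine ⟨p, hp, q, ⟨by omega, by omega⟩, ?_⟩
      rw [if_pos ((pvCondA_iff cycles p q hp hq).mpr hsh)]
      simp
    · refine ⟨q, hq, p, ⟨by omega, by omega⟩, ?_⟩
      rw [if_pos ((pvCondA_iff cycles q p hq hp).mpr (pvShared_symm hsh))]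
      simp

-- ---- the inverted index ----

def pvIdxs (cycles : List (List Int)) (v : Int) : List Nat :=
  (List.range cycles.length).filter (fun t => decide (v ∈ cycles.getD t []))

lemma pvOccStep_get? (S : List Int) (hnd : S.Nodup) (occ : PySem.Dict Int (List Nat)) (i : Nat) (v : Int) :
    (S.foldl (fun occ v => occ.insert v (occ.getD v [] ++ [i])) occ).get? v
      = if v ∈ S then some (occ.getD v [] ++ [i]) else occ.get? v := by
  induction S generalizing occ with
  | nil => simp
  | cons w t ih =>
    obtain ⟨hw, ht⟩ := List.nodup_cons.mp hnd
    simp only [List.foldl_cons]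
    rw [ih ht]
    by_cases hvt : v ∈ t
    · have hvw : v ≠ w := fun h => hw (h ▸ hvt)
      rw [if_pos hvt, if_pos (List.mem_cons.mpr (Or.inr hvt)),
        PySem.Dict.getD_insert_of_ne _ _ _ hvw]
    · rw [if_neg hvt]
      by_cases hvw : v = w
      · subst hvw
        rw [PySem.Dict.get?_insert_self, if_pos (List.mem_cons.mpr (Or.inl rfl))]
      · rw [PySem.Dict.get?_insert_of_ne _ _ hvw,
          if_neg (by simp [hvw, hvt])]

lemma pvFilter_nil_of_not_any (cs : List (List Int)) (v : Int)
    (h : cs.any (fun c => decide (v ∈ c)) = false) :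
    (List.range cs.length).filter (fun t => decide (v ∈ cs.getD t [])) = [] := by
  rw [List.filter_eq_nil_iff]
  intro t htr
  rw [List.mem_range] at htr
  rw [List.getD_eq_getElem _ _ htr]
  simp only [List.any_eq_false, decide_eq_true_eq] at h
  simpa using h _ (List.getElem_mem htr)

lemma pvBuildOcc_get? (cs : List (List Int)) (s : Nat) (occ0 : PySem.Dict Int (List Nat)) (v : Int) :
    (pvBuildOcc cs s occ0).get? v
      = if cs.any (fun c => decide (v ∈ c)) then
          some (occ0.getD v [] ++ ((List.range cs.length).filter (fun t => decide (v ∈ cs.getD t []))).map (· + s))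
        else occ0.get? v := by
  induction cs generalizing s occ0 with
  | nil => simp [pvBuildOcc]
  | cons c rest ih =>
    have hstep : (pvOccStep s occ0 c).get? v
        = if v ∈ c then some (occ0.getD v [] ++ [s]) else occ0.get? v := by
      rw [pvOccStep, pvOccStep_get? _ (PySem.Set.nodup_ofList c) occ0 s v]
      by_cases hc : v ∈ c
      · rw [if_pos ((PySem.Set.mem_ofList _ _).mpr hc), if_pos hc]
      · rw [if_neg (fun h => hc ((PySem.Set.mem_ofList _ _).mp h)), if_neg hc]
    have hstepD : (pvOccStep s occ0 c).getD v []
        = occ0.getD v [] ++ (if v ∈ c then [s] else []) := by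
      rw [PySem.Dict.getD_eq_get?_getD, hstep]
      by_cases hc : v ∈ c <;> simp [hc, PySem.Dict.getD_eq_get?_getD]
    have hF : ((List.range (c :: rest).length).filter (fun t => decide (v ∈ (c :: rest).getD t []))).map (· + s)
        = (if v ∈ c then [s] else [])
          ++ ((List.range rest.length).filter (fun t => decide (v ∈ rest.getD t []))).map (· + (s + 1)) := by
      rw [List.length_cons, List.range_succ_eq_map, List.filter_cons]
      have hcomp : ((fun t => decide (v ∈ (c :: rest).getD t [])) ∘ Nat.succ)
          = fun t => decide (v ∈ rest.getD t []) := by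
        funext t; rfl
      have hmap : ∀ l : List Nat, (l.map Nat.succ).map (· + s) = l.map (fun t => t + (s + 1)) := by
        intro l; rw [List.map_map]; apply List.map_congr_left; intro t _; simp [Function.comp]; omega
      have h0 : (c :: rest).getD 0 [] = c := rfl
      by_cases hc : v ∈ c
      · rw [h0, if_pos (by simpa using hc)]
        simp only [List.map_cons, List.filter_map, hcomp, hmap, Nat.zero_add]
        simp [hc]
      · rw [h0, if_neg (by simpa using hc)]
        simp only [List.filter_map, hcomp, hmap]
        simp [hc]
    simp only [pvBuildOcc]
    rw [ih (s + 1) (pvOccStep s occ0 c)]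
    by_cases hrest : rest.any (fun c => decide (v ∈ c))
    · have hcons : ((c :: rest).any fun c => decide (v ∈ c)) = true := by
        simp only [List.any_cons, hrest, Bool.or_true]
      rw [if_pos hrest, hstepD, if_pos hcons, hF]
      by_cases hc : v ∈ c
      · rw [if_pos hc]; simp
      · rw [if_neg hc]; simp
    · rw [if_neg (by simp [hrest]), hstep]
      rw [Bool.not_eq_true] at hrest
      by_cases hc : v ∈ c
      · rw [if_pos hc, if_pos (by simp [List.any_cons, hc]), hF,
          pvFilter_nil_of_not_any rest v hrest]
        simp [hc]
      · rw [if_neg hc, if_neg (by simp [List.any_cons, hc, hrest])]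

lemma pvBuildOcc_nodup (cs : List (List Int)) (s : Nat) (occ0 : PySem.Dict Int (List Nat))
    (h : occ0.keys.Nodup) : (pvBuildOcc cs s occ0).keys.Nodup := by
  induction cs generalizing s occ0 with
  | nil => exact h
  | cons c rest ih =>
    exact ih (s + 1) _ (PySem.Dict.nodup_keys_foldl_insert _ _ _ h)

lemma pvAny_iff (cycles : List (List Int)) (v : Int) :
    cycles.any (fun c => decide (v ∈ c)) = true ↔ pvIdxs cycles v ≠ [] := by
  constructor
  · intro h hnil
    simp only [List.any_eq_true, decide_eq_true_eq] at h
    obtain ⟨c, hc, hv⟩ := h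
    obtain ⟨t, ht, rfl⟩ := List.mem_iff_getElem.mp hc
    have : t ∈ pvIdxs cycles v := by
      rw [pvIdxs, List.mem_filter, List.mem_range]
      exact ⟨by simpa using ht, by simp [List.getElem?_eq_getElem ht, hv]⟩
    rw [hnil] at this
    exact absurd this (List.not_mem_nil)
  · intro h
    by_contra hany
    rw [Bool.not_eq_true] at hany
    exact h (pvFilter_nil_of_not_any cycles v hany)

lemma pvBuildOcc_get?_final (cycles : List (List Int)) (v : Int) :
    (pvBuildOcc cycles 0 PySem.Dict.empty).get? v
      = if cycles.any (fun c => decide (v ∈ c)) then some (pvIdxs cycles v) else none := by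
  rw [pvBuildOcc_get?]
  by_cases h : cycles.any (fun c => decide (v ∈ c))
  · rw [if_pos h, if_pos h, PySem.Dict.getD_empty]
    simp [pvIdxs]
  · rw [if_neg h, if_neg h, PySem.Dict.get?_empty]

lemma mem_values_buildOcc (cycles : List (List Int)) (idxs : List Nat) :
    idxs ∈ (pvBuildOcc cycles 0 PySem.Dict.empty).values ↔
      ∃ v, idxs = pvIdxs cycles v ∧ idxs ≠ [] := by
  have hnd := pvBuildOcc_nodup cycles 0 PySem.Dict.empty PySem.Dict.nodup_keys_empty
  simp only [PySem.Dict.values, List.mem_map]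
  constructor
  · rintro ⟨⟨k, l⟩, hmem, hsnd⟩
    have hget := (PySem.Dict.get?_eq_some_iff_mem_items _ _ _ hnd).mpr hmem
    rw [pvBuildOcc_get?_final] at hget
    by_cases h : cycles.any (fun c => decide (k ∈ c))
    all_goals simp only at hsnd
    · rw [if_pos h] at hget
      have hl : l = pvIdxs cycles k := (Option.some_inj.mp hget).symm
      refine ⟨k, ?_, ?_⟩
      · rw [← hsnd]; exact hl
      · rw [← hsnd, hl]; exact (pvAny_iff cycles k).mp h
    · rw [if_neg h] at hget; exact absurd hget (by simp)
  · rintro ⟨v, rfl, hne⟩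
    have hany : cycles.any (fun c => decide (v ∈ c)) = true := (pvAny_iff cycles v).mpr hne
    have hget : (pvBuildOcc cycles 0 PySem.Dict.empty).get? v = some (pvIdxs cycles v) := by
      rw [pvBuildOcc_get?_final, if_pos hany]
    exact ⟨(v, pvIdxs cycles v), PySem.Dict.mem_items_of_get?_eq_some _ hget, rfl⟩

lemma mem_pvIdxs (cycles : List (List Int)) (v : Int) (x : Nat) :
    x ∈ pvIdxs cycles v ↔ x < cycles.length ∧ v ∈ cycles.getD x [] := by
  simp [pvIdxs, List.mem_filter, List.mem_range]

lemma pvIdxs_pairwise (cycles : List (List Int)) (v : Int) :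
    (pvIdxs cycles v).Pairwise (· < ·) := by
  exact (List.pairwise_lt_range).filter _

lemma mem_pvPairsOf (idxs : List Nat) (h : idxs.Pairwise (· < ·)) (p q : Nat) :
    (p, q) ∈ pvPairsOf idxs ↔ p ∈ idxs ∧ q ∈ idxs ∧ p ≠ q := by
  simp only [pvPairsOf, List.mem_flatMap, List.mem_range, List.mem_range'_1,
    List.mem_cons, List.not_mem_nil, or_false]
  constructor
  · rintro ⟨a, ha, b, ⟨hb1, hb2⟩, hmem⟩
    have hbl : b < idxs.length := by omega
    have hlt : idxs[a] < idxs[b] := List.pairwise_iff_getElem.mp h a b ha hbl (by omega)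
    have hga : idxs.getD a 0 = idxs[a] := List.getD_eq_getElem _ _ ha
    have hgb : idxs.getD b 0 = idxs[b] := List.getD_eq_getElem _ _ hbl
    rcases hmem with h1 | h1 <;> rw [Prod.ext_iff] at h1 <;> obtain ⟨rfl, rfl⟩ := h1 <;>
      rw [hga, hgb] <;>
      exact ⟨List.getElem_mem _, List.getElem_mem _, by omega⟩
  · rintro ⟨hp, hq, hne⟩
    obtain ⟨a, ha, rfl⟩ := List.mem_iff_getElem.mp hp
    obtain ⟨b, hb, rfl⟩ := List.mem_iff_getElem.mp hq
    have hab : a ≠ b := fun e => hne (by subst e; rfl)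
    rcases Nat.lt_or_gt_of_ne hab with hlt | hgt
    · exact ⟨a, ha, b, ⟨by omega, by omega⟩,
        Or.inl (by rw [List.getD_eq_getElem _ _ ha, List.getD_eq_getElem _ _ hb])⟩
    · exact ⟨b, hb, a, ⟨by omega, by omega⟩,
        Or.inr (by rw [List.getD_eq_getElem _ _ ha, List.getD_eq_getElem _ _ hb])⟩

lemma mem_pairsB (cycles : List (List Int)) (p q : Nat) :
    (p, q) ∈ pairsB cycles ↔
      p < cycles.length ∧ q < cycles.length ∧ p ≠ q ∧ pvShared cycles p q := by
  unfold pairsB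
  rw [List.mem_flatMap]
  constructor
  · rintro ⟨idxs, hmem, hpq⟩
    obtain ⟨v, rfl, _⟩ := (mem_values_buildOcc _ _).mp hmem
    obtain ⟨hp, hq, hneq⟩ := (mem_pvPairsOf _ (pvIdxs_pairwise _ _) p q).mp hpq
    rw [mem_pvIdxs] at hp hq
    exact ⟨hp.1, hq.1, hneq, ⟨v, hp.2, hq.2⟩⟩
  · rintro ⟨hp, hq, hne, v, h1, h2⟩
    have hmemp : p ∈ pvIdxs cycles v := (mem_pvIdxs _ _ _).mpr ⟨hp, h1⟩
    refine ⟨pvIdxs cycles v, ?_, ?_⟩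
    · rw [mem_values_buildOcc]
      exact ⟨v, rfl, fun hnil => absurd (hnil ▸ hmemp) (List.not_mem_nil)⟩
    · exact (mem_pvPairsOf _ (pvIdxs_pairwise _ _) p q).mpr
        ⟨hmemp, (mem_pvIdxs _ _ _).mpr ⟨hq, h2⟩, hne⟩

-- ===== VERDICT (by name: the statement is the Claim_ definition above) =====
theorem build_omega_graph_spec : Claim_equal_build_omega_graph := by
  intro cycles _
  unfold Spec_build_omega_graph
  rw [build_A_eq_apply, build_B_eq_apply]
  refine congrArg _ ?_
  apply pvApply_eq_of_mem_iff
  intro p q _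
  rw [mem_pairsA, mem_pairsB]
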